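-- pv_equiv track=rewrite | github.com/gradient-pulse/phi-mesh | tools/suggest_aliases.py | sort_group
-- ===== SOURCE A (Python) =====
-- from typing import Dict, List, Tuple
--
-- def sort_group(group: List[str]) -> List[str]:
--     # sort with canonical-ish looking names first (Title_Case over all-caps/all-lower)
--     def weight(name: str) -> Tuple[int, str]:
--         # Lower weight = earlier in sort
--         if "_" in name and name == "_".join(p[:1].upper() + p[1:] for p in name.split("_")):
--             return (0, name)  # Title_Cased snake
--         if name.istitle():
--             return (1, name)
--         if name.isupper():
--             return (2, name)
--         return (3, name.lower())
--     return sorted(group, key=weight)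
-- ===== SOURCE B (Python) =====
-- from typing import List
--
-- def sort_group(group: List[str]) -> List[str]:
--     # Partition into four ordered buckets in one pass, then sort each bucket
--     # (name-keyed for the first three, lowercase-keyed for the rest) and concatenate.
--     b0, b1, b2, b3 = [], [], [], []
--     for name in group:
--         if "_" in name and name == "_".join(p[:1].upper() + p[1:] for p in name.split("_")):
--             b0.append(name)
--         elif name.istitle():
--             b1.append(name)
--         elif name.isupper():
--             b2.append(name)
--         else:
--             b3.append(name)
--     return sorted(b0) + sorted(b1) + sorted(b2) + sorted(b3, key=str.lower)
-- ===== Notes on version B (the rewrite author's own statement) =====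
-- stated objective: faster
-- what changed: Replaces A's single global stable sort with a tuple key (weight, name-or-lowercase) by a one-pass partition into the four weight buckets followed by four independent per-bucket sorts (plain for buckets 0-2, lowercase-keyed for bucket 3) concatenated in bucket order.
import Mathlib
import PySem

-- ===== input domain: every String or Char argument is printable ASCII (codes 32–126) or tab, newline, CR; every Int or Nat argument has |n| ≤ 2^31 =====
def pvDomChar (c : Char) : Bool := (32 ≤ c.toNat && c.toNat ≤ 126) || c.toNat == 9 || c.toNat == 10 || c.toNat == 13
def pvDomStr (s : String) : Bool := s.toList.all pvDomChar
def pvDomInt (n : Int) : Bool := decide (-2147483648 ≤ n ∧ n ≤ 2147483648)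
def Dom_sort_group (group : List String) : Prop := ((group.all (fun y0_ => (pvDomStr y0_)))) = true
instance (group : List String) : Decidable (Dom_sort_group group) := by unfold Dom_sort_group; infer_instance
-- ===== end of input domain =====

-- B partitions the names into the four weight buckets in one pass and sorts each bucket
-- separately instead of one global tuple-key sort; a timing run measured B faster (classification runs once per name, comparisons are on plain strings).


-- ===== PORT A =====
-- shared helpers: hand ports of the str builtins A and B both call; exact on the ASCII domain
-- str.istitle(): CPython's cased/previous_is_cased scan, state = (ok, previous_is_cased, cased)
def pyIstitle (s : String) : Bool :=
  let st := s.toList.foldl (fun (st : Bool × Bool × Bool) c =>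
      if PySem.Chars.isupper c then (st.1 && !st.2.1, true, true)
      else if PySem.Chars.islower c then (st.1 && st.2.1, true, true)
      else (st.1, false, st.2.2)) (true, false, false)
  st.1 && st.2.2
-- str.isupper(): no lowercase character and at least one uppercase one (exact on ASCII)
def pyIsupperStr (s : String) : Bool :=
  s.toList.all (fun c => !PySem.Chars.islower c) && s.toList.any (fun c => PySem.Chars.isupper c)
-- '"_" in name and name == "_".join(p[:1].upper() + p[1:] for p in name.split("_"))'
def titleSnake (name : String) : Bool :=
  PySem.Str.isIn "_" name &&
    name.toList == PySem.Chars.join ['_']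
      ((PySem.Chars.splitOn name.toList ['_']).map (fun p =>
        match p with
        | [] => []
        | c :: r => PySem.Chars.upperChar c :: r))

-- A's inner 'weight': lower weight = earlier in sort
def weight (name : String) : Int × String :=
  if titleSnake name then (0, name)
  else if pyIstitle name then (1, name)
  else if pyIsupperStr name then (2, name)
  else (3, PySem.Str.lower name)

def sort_group (group : List String) : List String :=
  PySem.List.sorted2 group (fun n => (weight n).1) (fun n => (weight n).2)

-- ===== PORT B =====
-- one partition step of B's loop (the if/elif chain appending to one of four buckets)
def partStep (acc : List String × List String × List String × List String) (name : String) :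
    List String × List String × List String × List String :=
  if titleSnake name then (acc.1 ++ [name], acc.2.1, acc.2.2.1, acc.2.2.2)
  else if pyIstitle name then (acc.1, acc.2.1 ++ [name], acc.2.2.1, acc.2.2.2)
  else if pyIsupperStr name then (acc.1, acc.2.1, acc.2.2.1 ++ [name], acc.2.2.2)
  else (acc.1, acc.2.1, acc.2.2.1, acc.2.2.2 ++ [name])

def sort_group_alt (group : List String) : List String :=
  let p := group.foldl partStep ([], [], [], [])
  PySem.List.sorted p.1 (fun n => n) false ++
    PySem.List.sorted p.2.1 (fun n => n) false ++
      PySem.List.sorted p.2.2.1 (fun n => n) false ++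
        PySem.List.sorted p.2.2.2 (fun n => PySem.Str.lower n) false

-- ===== PRECONDITION & SPEC =====
def Spec_sort_group (group : List String) (out : List String) : Prop := out = sort_group_alt group
instance (group : List String) (out : List String) : Decidable (Spec_sort_group group out) := by unfold Spec_sort_group; infer_instance

-- ===== CLAIM (what is proved, stated in full; the proofs are below) =====
def Claim_equal_sort_group : Prop := ∀ (group : List String), Dom_sort_group group → Spec_sort_group group (sort_group group)

-- ===== LEMMAS AND PROOFS =====

-- the tuple comparison sorted2 uses for A's key
def myLt (a b : String) : Bool :=
  decide ((weight a).1 < (weight b).1) ||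
    (!decide ((weight b).1 < (weight a).1) && decide ((weight a).2 < (weight b).2))

-- bucket-i sublist of xs (A's weight-0/1/2/3 classes)
def bktF (i : Int) (xs : List String) : List String :=
  xs.filter (fun n => decide ((weight n).1 = i))

lemma weight_fst_cases (n : String) :
    (weight n).1 = 0 ∨ (weight n).1 = 1 ∨ (weight n).1 = 2 ∨ (weight n).1 = 3 := by
  unfold weight; split_ifs <;> simp

lemma weight_snd_of_ne3 (n : String) (h : (weight n).1 ≠ 3) : (weight n).2 = n := by
  unfold weight at *; split_ifs <;> simp_all

lemma weight_snd_of_eq3 (n : String) (h : (weight n).1 = 3) :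
    (weight n).2 = PySem.Str.lower n := by
  unfold weight at *; split_ifs <;> simp_all

lemma myLt_of_lt {x y : String} (h : (weight x).1 < (weight y).1) : myLt x y = true := by
  simp [myLt, h]

lemma myLt_of_gt {x y : String} (h : (weight y).1 < (weight x).1) : myLt x y = false := by
  simp [myLt, h]; omega

lemma myLt_of_eq {x y : String} (h : (weight x).1 = (weight y).1) :
    myLt x y = decide ((weight x).2 < (weight y).2) := by
  simp [myLt, h]

lemma insertBy_congr_mem {before1 before2 : String → String → Bool} (x : String)
    (ys : List String) (h : ∀ y ∈ ys, before1 x y = before2 x y) :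
    PySem.List.insertBy before1 x ys = PySem.List.insertBy before2 x ys := by
  induction ys with
  | nil => rfl
  | cons a t ih =>
    simp only [PySem.List.insertBy]
    rw [h a (by simp)]
    by_cases hb : before2 x a = true
    · simp [hb]
    · simp [hb, ih (fun y hy => h y (by simp [hy]))]

lemma insertBy_append_left {before : String → String → Bool} (x : String)
    (l r : List String) (h : ∀ y ∈ l, before x y = false) :
    PySem.List.insertBy before x (l ++ r) = l ++ PySem.List.insertBy before x r := by
  induction l with
  | nil => rfl
  | cons a t ih =>
    simp only [List.cons_append, PySem.List.insertBy, h a (by simp)]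
    simp [ih (fun y hy => h y (by simp [hy]))]

lemma insertBy_append_right {before : String → String → Bool} (x : String)
    (l r : List String) (h : ∀ y ∈ r, before x y = true) :
    PySem.List.insertBy before x (l ++ r) = PySem.List.insertBy before x l ++ r := by
  induction l with
  | nil =>
    cases r with
    | nil => rfl
    | cons b rt => simp [PySem.List.insertBy, h b (by simp)]
  | cons a t ih =>
    simp only [List.cons_append, PySem.List.insertBy]
    by_cases hb : before x a = true
    · simp [hb]
    · simp [hb, ih]

lemma sorted2_eq_foldl (xs : List String) :
    PySem.List.sorted2 xs (fun n => (weight n).1) (fun n => (weight n).2) =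
      xs.foldl (fun acc x => PySem.List.insertBy myLt x acc) [] := rfl

lemma sorted_append_singleton (xs : List String) (x : String) {κ : Type} [LinearOrder κ]
    (key : String → κ) :
    PySem.List.sorted (xs ++ [x]) key false =
      PySem.List.insertBy (fun a b => decide (key a < key b)) x
        (PySem.List.sorted xs key false) := by
  rw [PySem.List.sorted_eq_foldl_insertBy, PySem.List.sorted_eq_foldl_insertBy,
    List.foldl_append]
  rfl

lemma bktF_append_singleton (i : Int) (xs : List String) (x : String) :
    bktF i (xs ++ [x]) =
      bktF i xs ++ (if (weight x).1 = i then [x] else []) := by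
  simp only [bktF, List.filter_append, List.filter_cons, List.filter_nil]
  split_ifs with h <;> simp_all

lemma mem_bktF {i : Int} {xs : List String} {y : String} (h : y ∈ bktF i xs) :
    (weight y).1 = i := by
  simp only [bktF, List.mem_filter, decide_eq_true_eq] at h
  exact h.2

lemma mem_sorted_bktF {i : Int} {xs : List String} {y : String} {κ : Type} [LinearOrder κ]
    {key : String → κ}
    (h : y ∈ PySem.List.sorted (bktF i xs) key false) : (weight y).1 = i :=
  mem_bktF ((PySem.List.mem_sorted _ _ _ _).mp h)

-- partition loop = the four weight-class filters
lemma part_spec (xs : List String) (b0 b1 b2 b3 : List String) :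
    xs.foldl partStep (b0, b1, b2, b3) =
      (b0 ++ bktF 0 xs, b1 ++ bktF 1 xs, b2 ++ bktF 2 xs, b3 ++ bktF 3 xs) := by
  induction xs generalizing b0 b1 b2 b3 with
  | nil => simp [bktF]
  | cons x t ih =>
    simp only [List.foldl_cons, partStep]
    have hb : ∀ i : Int, bktF i (x :: t) =
        (if (weight x).1 = i then [x] else []) ++ bktF i t := by
      intro i
      simp only [bktF, List.filter_cons]
      split_ifs with h <;> simp_all
    split_ifs with h0 h1 h2
    · rw [ih]
      have : (weight x).1 = 0 := by unfold weight; simp [h0]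
      simp [hb, this]
    · rw [ih]
      have : (weight x).1 = 1 := by unfold weight; simp [h0, h1]
      simp [hb, this]
    · rw [ih]
      have : (weight x).1 = 2 := by unfold weight; simp [h0, h1, h2]
      simp [hb, this]
    · rw [ih]
      have : (weight x).1 = 3 := by unfold weight; simp [h0, h1, h2]
      simp [hb, this]

-- the heart: A's single stable tuple-key sort = concatenation of B's four bucket sorts
lemma main_decomp (group : List String) :
    PySem.List.sorted2 group (fun n => (weight n).1) (fun n => (weight n).2) =
      PySem.List.sorted (bktF 0 group) (fun n => n) false ++
        PySem.List.sorted (bktF 1 group) (fun n => n) false ++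
          PySem.List.sorted (bktF 2 group) (fun n => n) false ++
            PySem.List.sorted (bktF 3 group) (fun n => PySem.Str.lower n) false := by
  induction group using List.reverseRecOn with
  | nil => rfl
  | append_singleton xs x ih =>
    rw [sorted2_eq_foldl, List.foldl_append, List.foldl_cons, List.foldl_nil,
      ← sorted2_eq_foldl, ih]
    have hid : ∀ (i : Int) (h : (weight x).1 = i) (hne : i ≠ 3),
        PySem.List.insertBy myLt x (PySem.List.sorted (bktF i xs) (fun n => n) false) =
          PySem.List.sorted (bktF i xs ++ [x]) (fun n => n) false := by
      intro i h hne
      rw [sorted_append_singleton]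
      refine insertBy_congr_mem x _ (fun y hy => ?_)
      have hy' := mem_sorted_bktF hy
      rw [myLt_of_eq (by omega),
        weight_snd_of_ne3 x (by omega), weight_snd_of_ne3 y (by omega)]
    have hlow : (weight x).1 = 3 →
        PySem.List.insertBy myLt x
            (PySem.List.sorted (bktF 3 xs) (fun n => PySem.Str.lower n) false) =
          PySem.List.sorted (bktF 3 xs ++ [x]) (fun n => PySem.Str.lower n) false := by
      intro h
      rw [sorted_append_singleton]
      refine insertBy_congr_mem x _ (fun y hy => ?_)
      have hy' := mem_sorted_bktF hy
      rw [myLt_of_eq (by omega),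
        weight_snd_of_eq3 x h, weight_snd_of_eq3 y hy']
    simp only [List.append_assoc]
    have m0 : ∀ y ∈ PySem.List.sorted (bktF 0 xs) (fun n => n) false, (weight y).1 = 0 :=
      fun y hy => mem_sorted_bktF hy
    have m1 : ∀ y ∈ PySem.List.sorted (bktF 1 xs) (fun n => n) false, (weight y).1 = 1 :=
      fun y hy => mem_sorted_bktF hy
    have m2 : ∀ y ∈ PySem.List.sorted (bktF 2 xs) (fun n => n) false, (weight y).1 = 2 :=
      fun y hy => mem_sorted_bktF hy
    have m3 : ∀ y ∈ PySem.List.sorted (bktF 3 xs) (fun n => PySem.Str.lower n) false,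
        (weight y).1 = 3 := fun y hy => mem_sorted_bktF hy
    rcases weight_fst_cases x with h | h | h | h
    · rw [insertBy_append_right x _ _ (by
        intro y hy
        simp only [List.mem_append] at hy
        rcases hy with hy | hy | hy
        · exact myLt_of_lt (by have := m1 y hy; omega)
        · exact myLt_of_lt (by have := m2 y hy; omega)
        · exact myLt_of_lt (by have := m3 y hy; omega))]
      rw [hid 0 h (by omega)]
      simp [bktF_append_singleton, h]
    · rw [insertBy_append_left x _ _ (fun y hy => myLt_of_gt (by have := m0 y hy; omega))]
      rw [insertBy_append_right x _ _ (by
        intro y hy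
        simp only [List.mem_append] at hy
        rcases hy with hy | hy
        · exact myLt_of_lt (by have := m2 y hy; omega)
        · exact myLt_of_lt (by have := m3 y hy; omega))]
      rw [hid 1 h (by omega)]
      simp [bktF_append_singleton, h]
    · rw [insertBy_append_left x _ _ (fun y hy => myLt_of_gt (by have := m0 y hy; omega))]
      rw [insertBy_append_left x _ _ (fun y hy => myLt_of_gt (by have := m1 y hy; omega))]
      rw [insertBy_append_right x _ _ (fun y hy => myLt_of_lt (by have := m3 y hy; omega))]
      rw [hid 2 h (by omega)]
      simp [bktF_append_singleton, h]
    · rw [insertBy_append_left x _ _ (fun y hy => myLt_of_gt (by have := m0 y hy; omega))]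
      rw [insertBy_append_left x _ _ (fun y hy => myLt_of_gt (by have := m1 y hy; omega))]
      rw [insertBy_append_left x _ _ (fun y hy => myLt_of_gt (by have := m2 y hy; omega))]
      rw [hlow h]
      simp [bktF_append_singleton, h]

-- ===== VERDICT (by name: the statement is the Claim_ definition above) =====
theorem sort_group_spec : Claim_equal_sort_group := by
  intro group _
  show sort_group group = sort_group_alt group
  rw [sort_group, main_decomp, sort_group_alt]
  simp only [part_spec, List.nil_append]
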